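-- pv_equiv track=rewrite | github.com/victorivanovspb/challenge-accepted | resp_rcc/rcc_2011/qual_01/ksort/ksort.py | check_mass
-- ===== SOURCE A (Python) =====
-- def get_el_group_by_k(mass, start_pos, k):
--     result = []
--     pos = start_pos
--     while pos < len(mass): # go right to end
--         result.append(mass[pos])
--         pos += k
--     pos = start_pos - k
--     while pos >= 0:
--         result.append(mass[pos])
--         pos -= k
--     return result
--
-- def check_mass(mass, k, sorted_mass):
--     for idx, el in enumerate(mass):
--         fault = True
--
--         m = get_el_group_by_k(mass, idx, k)
--         #print m
--         for elj in m:
--             if sorted_mass[idx] == elj: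
--                 fault = False
--         if fault:
--             return False
--     return True
-- ===== SOURCE B (Python) =====
-- def check_mass(mass, k, sorted_mass):
--     groups = {}
--     for i, el in enumerate(mass):
--         groups.setdefault(i % k, set()).add(el)
--     for i in range(len(mass)):
--         if sorted_mass[i] not in groups[i % k]:
--             return False
--     return True
-- ===== Notes on version B (the rewrite author's own statement) =====
-- stated objective: alternative
-- what changed: Instead of re-scanning the whole k-stride group for every index (A's helper walks right and left per element), B builds one dict mapping each residue class i % k to the set of values at those indices in a single pass, then answers each per-index test with a set-membership lookup in a second early-exit pass.
import Mathlib
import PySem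

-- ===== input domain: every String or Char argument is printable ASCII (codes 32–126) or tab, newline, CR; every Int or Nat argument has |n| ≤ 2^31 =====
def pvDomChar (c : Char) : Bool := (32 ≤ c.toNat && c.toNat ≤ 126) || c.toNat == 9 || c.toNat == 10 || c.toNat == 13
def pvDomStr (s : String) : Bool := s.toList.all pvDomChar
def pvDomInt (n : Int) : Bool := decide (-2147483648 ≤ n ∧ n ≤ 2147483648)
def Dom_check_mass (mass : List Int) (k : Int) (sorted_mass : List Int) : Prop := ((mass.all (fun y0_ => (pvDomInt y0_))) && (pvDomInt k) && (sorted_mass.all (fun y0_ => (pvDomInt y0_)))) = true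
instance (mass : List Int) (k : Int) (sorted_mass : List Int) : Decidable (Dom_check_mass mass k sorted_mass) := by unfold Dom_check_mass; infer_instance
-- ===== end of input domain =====

-- B replaces A's per-element rescans of its k-stride group by one dict of value-sets per residue class mod k, built in a single pass, then an early-exit per-index lookup pass (alternative algorithm).


-- ===== PORT A =====
-- first while loop of get_el_group_by_k: pos goes right by k while pos < len(mass)
-- (fuel only makes the recursion total; inside Pre_ (k ≥ 1) it never runs out)
def pvGoRight (mass : List Int) (k : Int) : Nat → Int → List Int
  | 0, _ => []
  | fuel + 1, pos =>
    if pos < (mass.length : Int) then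
      PySem.List.pyGetD mass pos 0 :: pvGoRight mass k fuel (pos + k)
    else []

-- second while loop: pos goes left by k while pos >= 0
def pvGoLeft (mass : List Int) (k : Int) : Nat → Int → List Int
  | 0, _ => []
  | fuel + 1, pos =>
    if 0 ≤ pos then
      PySem.List.pyGetD mass pos 0 :: pvGoLeft mass k fuel (pos - k)
    else []

def get_el_group_by_k (mass : List Int) (start_pos : Int) (k : Int) : List Int :=
  pvGoRight mass k (mass.length + 1) start_pos ++ pvGoLeft mass k (mass.length + 1) (start_pos - k)

-- the 'for idx, el in enumerate(mass)' loop with its early 'return False'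
def pvCheckLoop (mass : List Int) (k : Int) (sorted_mass : List Int) : List (Int × Int) → Bool
  | [] => true
  | (idx, _el) :: rest =>
    let m := get_el_group_by_k mass idx k
    let fault := m.foldl (fun f elj => if PySem.List.pyGetD sorted_mass idx 0 == elj then false else f) true
    if fault then false else pvCheckLoop mass k sorted_mass rest

def check_mass (mass : List Int) (k : Int) (sorted_mass : List Int) : Bool :=
  pvCheckLoop mass k sorted_mass (PySem.List.enumerate mass)

-- ===== PORT B =====
-- groups.setdefault(i % k, set()).add(el) over enumerate(mass)
def pvBuildGroups (mass : List Int) (k : Int) : PySem.Dict Int (PySem.Set Int) :=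
  (PySem.List.enumerate mass).foldl
    (fun d p =>
      d.insert (PySem.Int.mod p.1 k)
        (PySem.Set.add (d.getD (PySem.Int.mod p.1 k) PySem.Set.empty) p.2))
    PySem.Dict.empty

-- 'for i in range(len(mass)): if sorted_mass[i] not in groups[i % k]: return False'
def pvAltLoop (groups : PySem.Dict Int (PySem.Set Int)) (k : Int) (sorted_mass : List Int) : List Nat → Bool
  | [] => true
  | i :: rest =>
    if PySem.Set.contains (groups.getD (PySem.Int.mod (i : Int) k) PySem.Set.empty)
        (PySem.List.pyGetD sorted_mass (i : Int) 0)
    then pvAltLoop groups k sorted_mass rest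
    else false

def check_mass_alt (mass : List Int) (k : Int) (sorted_mass : List Int) : Bool :=
  let groups := pvBuildGroups mass k
  pvAltLoop groups k sorted_mass (List.range mass.length)

-- ===== PRECONDITION & SPEC =====
-- Pre_ excludes exactly the inputs on which A does not return: k ≤ 0 with non-empty mass
-- (A's while loops never terminate) and the short-sorted_mass inputs on which every index
-- below len(sorted_mass) passes its group test, where A raises IndexError at
-- sorted_mass[len(sorted_mass)]; the short-sorted_mass inputs with an earlier failing
-- index, where A returns False, are INSIDE Pre_ (the last disjunct) and B matches them.
def Pre_check_mass (mass : List Int) (k : Int) (sorted_mass : List Int) : Prop :=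
  mass = [] ∨ (1 ≤ k ∧ (mass.length ≤ sorted_mass.length ∨
    ∃ i < sorted_mass.length, ∀ j < mass.length,
      ¬(PySem.Int.mod (j : Int) k = PySem.Int.mod (i : Int) k ∧
        mass.getD j 0 = sorted_mass.getD i 0)))
instance (mass : List Int) (k : Int) (sorted_mass : List Int) : Decidable (Pre_check_mass mass k sorted_mass) := by unfold Pre_check_mass; infer_instance

def pvWitness_check_mass : List Int × Int × List Int := ([3, 1, 2], 2, [1, 2, 3])

def Spec_check_mass (mass : List Int) (k : Int) (sorted_mass : List Int) (out : Bool) : Prop := out = check_mass_alt mass k sorted_mass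
instance (mass : List Int) (k : Int) (sorted_mass : List Int) (out : Bool) : Decidable (Spec_check_mass mass k sorted_mass out) := by unfold Spec_check_mass; infer_instance

-- ===== CLAIM (what is proved, stated in full; the proofs are below) =====
def Claim_equal_check_mass : Prop := ∀ (mass : List Int) (k : Int) (sorted_mass : List Int), Dom_check_mass mass k sorted_mass → Pre_check_mass mass k sorted_mass → Spec_check_mass mass k sorted_mass (check_mass mass k sorted_mass)

-- ===== LEMMAS AND PROOFS =====

-- elements collected by the right-going loop: exactly the mass[j] with pos ≤ j < len, j ≡ pos (mod k)
lemma pvGoRight_mem (mass : List Int) (k : Int) (hk : 1 ≤ k) (x : Int) :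
    ∀ (fuel : Nat) (pos : Int), 0 ≤ pos → (mass.length : Int) ≤ pos + fuel →
      (x ∈ pvGoRight mass k fuel pos ↔
        ∃ j : Nat, pos ≤ (j : Int) ∧ j < mass.length ∧ k ∣ ((j : Int) - pos) ∧ mass.getD j 0 = x) := by
  intro fuel
  induction fuel with
  | zero =>
    intro pos h0 hle
    simp only [pvGoRight, List.not_mem_nil, false_iff]
    rintro ⟨j, hpj, hjl, -, -⟩
    have hj : (j : Int) < mass.length := by exact_mod_cast hjl
    simp only [Nat.cast_zero, add_zero] at hle
    omega
  | succ n ih =>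
    intro pos h0 hle
    by_cases hlt : pos < (mass.length : Int)
    · rw [pvGoRight, if_pos hlt, List.mem_cons,
        ih (pos + k) (by omega) (by push_cast at hle ⊢; omega)]
      constructor
      · rintro (hx | ⟨j, h1, h2, ⟨c, hc⟩, h4⟩)
        · refine ⟨pos.toNat, by omega, by omega, ⟨0, by rw [mul_zero]; omega⟩, ?_⟩
          rw [PySem.List.pyGetD_of_nonneg mass 0 h0] at hx
          exact hx.symm
        · exact ⟨j, by omega, h2, ⟨c + 1, by rw [mul_add, mul_one, ← hc]; ring⟩, h4⟩
      · rintro ⟨j, h1, h2, ⟨c, hc⟩, h4⟩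
        by_cases hj : (j : Int) = pos
        · left
          rw [PySem.List.pyGetD_of_nonneg mass 0 h0]
          have hjj : j = pos.toNat := by omega
          rw [← hjj]
          exact h4.symm
        · right
          have hck : 0 < (j : Int) - pos := by omega
          have hkle : k ≤ (j : Int) - pos := Int.le_of_dvd hck ⟨c, hc⟩
          exact ⟨j, by omega, h2, ⟨c - 1, by rw [mul_sub, mul_one, ← hc]; ring⟩, h4⟩
    · rw [pvGoRight, if_neg hlt]
      simp only [List.not_mem_nil, false_iff]
      rintro ⟨j, h1, h2, -, -⟩
      have hj : (j : Int) < mass.length := by exact_mod_cast h2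
      omega

-- elements collected by the left-going loop: exactly the mass[j] with 0 ≤ j ≤ pos, j ≡ pos (mod k)
lemma pvGoLeft_mem (mass : List Int) (k : Int) (hk : 1 ≤ k) (x : Int) :
    ∀ (fuel : Nat) (pos : Int), pos < (mass.length : Int) → pos < (fuel : Int) →
      (x ∈ pvGoLeft mass k fuel pos ↔
        ∃ j : Nat, (j : Int) ≤ pos ∧ k ∣ (pos - (j : Int)) ∧ mass.getD j 0 = x) := by
  intro fuel
  induction fuel with
  | zero =>
    intro pos hlen h0
    simp only [pvGoLeft, List.not_mem_nil, false_iff]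
    rintro ⟨j, hpj, -, -⟩
    simp only [Nat.cast_zero] at h0
    omega
  | succ n ih =>
    intro pos hlen h0
    by_cases hpos : 0 ≤ pos
    · rw [pvGoLeft, if_pos hpos, List.mem_cons,
        ih (pos - k) (by omega) (by push_cast at h0 ⊢; omega)]
      constructor
      · rintro (hx | ⟨j, h1, ⟨c, hc⟩, h4⟩)
        · refine ⟨pos.toNat, by omega, ⟨0, by rw [mul_zero]; omega⟩, ?_⟩
          rw [PySem.List.pyGetD_of_nonneg mass 0 hpos] at hx
          exact hx.symm
        · exact ⟨j, by omega, ⟨c + 1, by rw [mul_add, mul_one, ← hc]; ring⟩, h4⟩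
      · rintro ⟨j, h1, ⟨c, hc⟩, h4⟩
        by_cases hj : (j : Int) = pos
        · left
          rw [PySem.List.pyGetD_of_nonneg mass 0 hpos]
          have hjj : j = pos.toNat := by omega
          rw [← hjj]
          exact h4.symm
        · right
          have hck : 0 < pos - (j : Int) := by omega
          have hkle : k ≤ pos - (j : Int) := Int.le_of_dvd hck ⟨c, hc⟩
          exact ⟨j, by omega, ⟨c - 1, by rw [mul_sub, mul_one, ← hc]; ring⟩, h4⟩
    · rw [pvGoLeft, if_neg hpos]
      simp only [List.not_mem_nil, false_iff]
      rintro ⟨j, h1, -, -⟩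
      omega

-- A's group at index i holds exactly the mass[j] with j ≡ i (mod k)
lemma mem_group (mass : List Int) (k : Int) (hk : 1 ≤ k) (i : Nat) (hi : i < mass.length) (x : Int) :
    x ∈ get_el_group_by_k mass (i : Int) k ↔
      ∃ j : Nat, j < mass.length ∧ k ∣ ((j : Int) - (i : Int)) ∧ mass.getD j 0 = x := by
  have hi' : (i : Int) < mass.length := by exact_mod_cast hi
  rw [get_el_group_by_k, List.mem_append,
    pvGoRight_mem mass k hk x (mass.length + 1) (i : Int) (by omega) (by push_cast; omega),
    pvGoLeft_mem mass k hk x (mass.length + 1) ((i : Int) - k) (by omega) (by push_cast; omega)]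
  constructor
  · rintro (⟨j, h1, h2, hd, h4⟩ | ⟨j, h1, ⟨c, hc⟩, h4⟩)
    · exact ⟨j, h2, hd, h4⟩
    · refine ⟨j, by omega, ⟨-c - 1, by linear_combination (-1 : Int) * hc⟩, h4⟩
  · rintro ⟨j, h1, ⟨c, hc⟩, h4⟩
    by_cases hij : (i : Int) ≤ (j : Int)
    · exact Or.inl ⟨j, hij, h1, ⟨c, hc⟩, h4⟩
    · have hck : 0 < (i : Int) - (j : Int) := by omega
      have hkle : k ≤ (i : Int) - (j : Int) :=
        Int.le_of_dvd hck ⟨-c, by linear_combination (-1 : Int) * hc⟩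
      exact Or.inr ⟨j, by omega, ⟨-c - 1, by linear_combination (-1 : Int) * hc⟩, h4⟩

-- A's outer loop with early return is an 'all' over the per-index tests
lemma pvCheckLoop_eq (mass : List Int) (k : Int) (sorted_mass : List Int) :
    ∀ l : List (Int × Int), pvCheckLoop mass k sorted_mass l =
      l.all (fun p => (get_el_group_by_k mass p.1 k).any
        (fun e => PySem.List.pyGetD sorted_mass p.1 0 == e)) := by
  intro l
  induction l with
  | nil => rfl
  | cons p rest ih =>
    obtain ⟨idx, el⟩ := p
    simp only [pvCheckLoop, PySem.List.foldl_if_false_eq, Bool.true_and, List.all_cons, ih]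
    cases h : (get_el_group_by_k mass idx k).any
        (fun e => PySem.List.pyGetD sorted_mass idx 0 == e) <;> simp

-- B's early-exit index loop is an 'all' over the per-index lookups
lemma pvAltLoop_eq (groups : PySem.Dict Int (PySem.Set Int)) (k : Int) (sorted_mass : List Int) :
    ∀ l : List Nat, pvAltLoop groups k sorted_mass l =
      l.all (fun i => PySem.Set.contains
        (groups.getD (PySem.Int.mod (i : Int) k) PySem.Set.empty)
        (PySem.List.pyGetD sorted_mass (i : Int) 0)) := by
  intro l
  induction l with
  | nil => rfl
  | cons i rest ih =>
    cases h : PySem.Set.contains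
        (groups.getD (PySem.Int.mod (i : Int) k) PySem.Set.empty)
        (PySem.List.pyGetD sorted_mass (i : Int) 0)
    · rw [pvAltLoop, h, List.all_cons, h]
      simp
    · rw [pvAltLoop, h, List.all_cons, h, Bool.true_and, if_pos rfl, ih]

-- B's grouping fold: membership in the set stored at r
lemma pvBuild_mem (k : Int) :
    ∀ (l : List (Int × Int)) (d : PySem.Dict Int (PySem.Set Int)) (r x : Int),
      (x ∈ (l.foldl (fun d p =>
          d.insert (PySem.Int.mod p.1 k)
            (PySem.Set.add (d.getD (PySem.Int.mod p.1 k) PySem.Set.empty) p.2)) d).getD r PySem.Set.empty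
        ↔ x ∈ d.getD r PySem.Set.empty ∨ ∃ p ∈ l, PySem.Int.mod p.1 k = r ∧ p.2 = x) := by
  intro l
  induction l with
  | nil => simp
  | cons p t ih =>
    intro d r x
    rw [List.foldl_cons, ih, PySem.Dict.getD_insert]
    by_cases hr : r = PySem.Int.mod p.1 k
    · subst hr
      rw [if_pos rfl, PySem.Set.mem_add]
      constructor
      · rintro ((h | h) | h)
        · exact Or.inl h
        · exact Or.inr ⟨p, List.mem_cons_self, rfl, h.symm⟩
        · obtain ⟨q, hq, h1, h2⟩ := h
          exact Or.inr ⟨q, List.mem_cons_of_mem _ hq, h1, h2⟩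
      · rintro (h | ⟨q, hq, h1, h2⟩)
        · exact Or.inl (Or.inl h)
        · rcases List.mem_cons.mp hq with hq1 | hq2
          · subst hq1; exact Or.inl (Or.inr h2.symm)
          · exact Or.inr ⟨q, hq2, h1, h2⟩
    · rw [if_neg hr]
      constructor
      · rintro (h | ⟨q, hq, h1, h2⟩)
        · exact Or.inl h
        · exact Or.inr ⟨q, List.mem_cons_of_mem _ hq, h1, h2⟩
      · rintro (h | ⟨q, hq, h1, h2⟩)
        · exact Or.inl h
        · rcases List.mem_cons.mp hq with hq1 | hq2
          · exact absurd (hq1 ▸ h1).symm hr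
          · exact Or.inr ⟨q, hq2, h1, h2⟩

-- B's set at residue r holds exactly the mass[j] with j % k = r
lemma pvGroups_mem (mass : List Int) (k : Int) (r x : Int) :
    x ∈ (pvBuildGroups mass k).getD r PySem.Set.empty ↔
      ∃ j : Nat, j < mass.length ∧ PySem.Int.mod (j : Int) k = r ∧ mass.getD j 0 = x := by
  rw [pvBuildGroups, pvBuild_mem]
  simp only [PySem.Dict.getD_empty, PySem.Set.empty, List.not_mem_nil, false_or]
  constructor
  · rintro ⟨p, hp, h1, h2⟩
    obtain ⟨j, hj, rfl⟩ := (PySem.List.mem_enumerate_iff mass 0 p).mp hp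
    refine ⟨j, hj, by simpa using h1, ?_⟩
    rw [List.getD_eq_getElem mass 0 hj]
    simpa using h2
  · rintro ⟨j, hj, h1, h2⟩
    refine ⟨(0 + (j : Int), mass[j]),
      (PySem.List.mem_enumerate_iff mass 0 _).mpr ⟨j, hj, rfl⟩, by simpa using h1, ?_⟩
    show mass[j] = x
    rw [← List.getD_eq_getElem mass 0 hj]
    exact h2

-- per index, A's scan of the group and B's set lookup agree
lemma pvPerIndex (mass : List Int) (k : Int) (sorted_mass : List Int) (hk : 1 ≤ k)
    (j : Nat) (hj : j < mass.length) :
    ((get_el_group_by_k mass (j : Int) k).any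
        (fun e => PySem.List.pyGetD sorted_mass (j : Int) 0 == e))
      = PySem.Set.contains
          ((pvBuildGroups mass k).getD (PySem.Int.mod (j : Int) k) PySem.Set.empty)
          (PySem.List.pyGetD sorted_mass (j : Int) 0) := by
  have hk0 : (0 : Int) < k := by omega
  rw [Bool.eq_iff_iff, List.any_eq_true, PySem.Set.contains_iff]
  rw [pvGroups_mem]
  constructor
  · rintro ⟨e, he, hbe⟩
    have hbe' : PySem.List.pyGetD sorted_mass (j : Int) 0 = e := by simpa using hbe
    obtain ⟨j', h1, hd, h4⟩ := (mem_group mass k hk j hj e).mp he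
    refine ⟨j', h1, ?_, by rw [h4, hbe']⟩
    rw [PySem.Int.mod_eq_emod_of_pos hk0, PySem.Int.mod_eq_emod_of_pos hk0]
    exact (Int.modEq_iff_dvd.trans dvd_sub_comm).mpr hd
  · rintro ⟨j', h1, hm, h4⟩
    refine ⟨PySem.List.pyGetD sorted_mass (j : Int) 0, ?_, by simp⟩
    apply (mem_group mass k hk j hj _).mpr
    refine ⟨j', h1, ?_, h4⟩
    rw [PySem.Int.mod_eq_emod_of_pos hk0, PySem.Int.mod_eq_emod_of_pos hk0] at hm
    exact (Int.modEq_iff_dvd.trans dvd_sub_comm).mp hm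

-- ===== VERDICT (by name: the statement is the Claim_ definition above) =====
theorem check_mass_spec : Claim_equal_check_mass := by
  intro mass k sorted_mass _hdom hpre
  unfold Spec_check_mass
  rcases hpre with hnil | ⟨hk, -⟩
  · subst hnil
    simp [check_mass, check_mass_alt, pvCheckLoop, pvAltLoop, PySem.List.enumerate_nil]
  · rw [check_mass, pvCheckLoop_eq, check_mass_alt]
    show _ = pvAltLoop _ _ _ _
    rw [pvAltLoop_eq]
    rw [Bool.eq_iff_iff, List.all_eq_true, List.all_eq_true]
    constructor
    · intro h i hi
      have hi' : i < mass.length := List.mem_range.mp hi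
      have hh := h (0 + (i : Int), mass[i])
        ((PySem.List.mem_enumerate_iff mass 0 _).mpr ⟨i, hi', rfl⟩)
      simp only [zero_add] at hh
      rw [← pvPerIndex mass k sorted_mass hk i hi']
      exact hh
    · intro h p hp
      obtain ⟨j, hj, rfl⟩ := (PySem.List.mem_enumerate_iff mass 0 p).mp hp
      simp only [zero_add]
      rw [pvPerIndex mass k sorted_mass hk j hj]
      exact h j (List.mem_range.mpr hj)
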